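-- pv_equiv track=rewrite | github.com/Wenhao-Yang/PythonLearning | Chapter 6 Neural Network/6.7_LearningtoPlayTicTacToe.py | get_symmetry
-- ===== SOURCE A (Python) =====
-- def get_symmetry(board, response, transformation):
--     """
--     :param board:list of integers 9 long: opposing mark = -1; friendly mark = 1; empty space = 0
--     :param response:
--     :param transformation: One of five transformations on a board: rotate180, rotate90, rotate270, flip_v, flip_h
--     :return: tuple:(new_board, new_response)
--     """
--     if transformation == 'rotate180':
--         new_response = 8 - response
--         return (board[::-1], new_response)
--     elif transformation == 'rotate90':
--         new_response = [6, 3, 0, 7, 4, 1, 8, 5, 2].index(response)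
--         tuple_board = list(zip(board[6:9], board[3:6], board[0:3]))
--         return ([value for item in tuple_board for value in item], new_response)
--     elif transformation == 'rotate270':
--         new_response = [2, 5, 8, 1, 4, 7, 0, 3, 6].index(response)
--         tuple_board = list(zip(board[0:3], board[3:6], board[6:9]))[::-1]
--         return ([value for item in tuple_board for value in item], new_response)
--     elif transformation == 'flip_v':
--         new_response = [6, 7, 8, 3, 4, 5, 0, 1, 2].index(response)
--         return (board[6:9] + board[3:6] + board[0:3], new_response)
--     elif transformation == 'flip_h':
--         new_response = [2, 1, 0, 5, 4, 3, 8, 7, 6].index(response)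
--         new_board = board[::-1]
--         return (new_board[6:9] + new_board[3:6] + new_board[0:3], new_response)
--     else:
--         raise ValueError('Method not implemented.')
-- ===== SOURCE B (Python) =====
-- # Group decomposition: each symmetry (except the self-inverse rotate180, which is a plain
-- # full reversal) is a mirror flag plus a word in two generators, R = rotate-90 and
-- # F = vertical flip, applied to a 3-row grid; the same generic pipeline transforms the
-- # board and an index list, from which the new response is located.
-- _WORDS = {'rotate90': ('R', False), 'rotate270': ('RRR', False),
--           'flip_v': ('F', False), 'flip_h': ('F', True)}
--
-- def _transform(cells, word, mirror):
--     if mirror: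
--         cells = cells[::-1]
--     grid = [cells[0:3], cells[3:6], cells[6:9]]
--     for op in word:
--         if op == 'R':
--             grid = [list(row) for row in zip(*grid[::-1])]
--         else:
--             grid = grid[::-1]
--     return [v for row in grid for v in row]
--
-- def get_symmetry(board, response, transformation):
--     if transformation == 'rotate180':
--         return (board[::-1], 8 - response)
--     if transformation not in _WORDS:
--         raise ValueError('Method not implemented.')
--     word, mirror = _WORDS[transformation]
--     new_board = _transform(board, word, mirror)
--     new_response = _transform(list(range(9)), word, mirror).index(response)
--     return (new_board, new_response)
-- ===== Notes on version B (the rewrite author's own statement) =====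
-- stated objective: alternative
-- what changed: B replaces A's five hand-written slice/zip/.index branches with one generic transform pipeline: each symmetry (except the self-inverse rotate180, a plain full reversal) is a mirror flag plus a word in the two generators rotate-90 and vertical-flip applied to a 3-row grid, and the same pipeline is run on the board and on an index list from which the new response is located.
import Mathlib
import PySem

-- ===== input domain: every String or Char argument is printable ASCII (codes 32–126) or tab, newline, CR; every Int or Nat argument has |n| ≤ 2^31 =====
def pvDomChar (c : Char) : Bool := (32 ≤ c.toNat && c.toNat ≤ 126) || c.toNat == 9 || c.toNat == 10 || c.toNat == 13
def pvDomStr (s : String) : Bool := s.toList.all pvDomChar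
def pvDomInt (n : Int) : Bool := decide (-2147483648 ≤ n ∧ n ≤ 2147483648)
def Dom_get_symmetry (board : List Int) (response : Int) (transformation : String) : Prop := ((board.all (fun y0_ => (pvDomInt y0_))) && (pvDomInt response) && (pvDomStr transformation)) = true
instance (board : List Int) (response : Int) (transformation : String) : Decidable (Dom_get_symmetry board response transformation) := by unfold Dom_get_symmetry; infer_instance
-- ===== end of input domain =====

-- B replaces A's five hand-written slice/zip/.index branches with one generic pipeline
-- (a mirror flag plus a word in the generators rotate-90 / vertical-flip, applied to a
-- 3-row grid) run on the board and on an index list; objective: alternative structure.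


-- ===== PORT A =====
-- board[::-1] is ported as List.reverse (exactly Python's full reverse slice);
-- list(zip(x,y,z)) is ported as nested List.zip flattened, which truncates exactly like Python's zip.
def get_symmetry (board : List Int) (response : Int) (transformation : String) : List Int × Int :=
  if transformation == "rotate180" then
    (board.reverse, 8 - response)
  else if transformation == "rotate90" then
    match PySem.List.index? [6, 3, 0, 7, 4, 1, 8, 5, 2] response with
    | none => ([], 0)  -- response not in the list: Python raises ValueError (excluded by Pre_)
    | some k =>
      let tuple_board := List.zip (PySem.List.slice board (some 6) (some 9))
        (List.zip (PySem.List.slice board (some 3) (some 6)) (PySem.List.slice board (some 0) (some 3)))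
      (tuple_board.flatMap (fun t => [t.1, t.2.1, t.2.2]), (k : Int))
  else if transformation == "rotate270" then
    match PySem.List.index? [2, 5, 8, 1, 4, 7, 0, 3, 6] response with
    | none => ([], 0)  -- ValueError (excluded by Pre_)
    | some k =>
      let tuple_board := (List.zip (PySem.List.slice board (some 0) (some 3))
        (List.zip (PySem.List.slice board (some 3) (some 6)) (PySem.List.slice board (some 6) (some 9)))).reverse
      (tuple_board.flatMap (fun t => [t.1, t.2.1, t.2.2]), (k : Int))
  else if transformation == "flip_v" then
    match PySem.List.index? [6, 7, 8, 3, 4, 5, 0, 1, 2] response with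
    | none => ([], 0)  -- ValueError (excluded by Pre_)
    | some k =>
      (PySem.List.slice board (some 6) (some 9) ++ PySem.List.slice board (some 3) (some 6)
        ++ PySem.List.slice board (some 0) (some 3), (k : Int))
  else if transformation == "flip_h" then
    match PySem.List.index? [2, 1, 0, 5, 4, 3, 8, 7, 6] response with
    | none => ([], 0)  -- ValueError (excluded by Pre_)
    | some k =>
      let new_board := board.reverse
      (PySem.List.slice new_board (some 6) (some 9) ++ PySem.List.slice new_board (some 3) (some 6)
        ++ PySem.List.slice new_board (some 0) (some 3), (k : Int))
  else
    ([], 0)  -- raise ValueError('Method not implemented.') (excluded by Pre_)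

-- ===== PORT B =====
-- zip(*rows) of Source B, hand-ported: truncating transpose over arbitrary rows, exact for Python's zip
def pvZipStarAux : List Int → List (List Int) → List (List Int)
  | [], _ => []
  | x :: xs, rs =>
      if rs.all (fun r => !r.isEmpty) then
        (x :: rs.map (fun r => r.headD 0)) :: pvZipStarAux xs (rs.map (fun r => r.tail))
      else []

def pvZipStar : List (List Int) → List (List Int)
  | [] => []
  | r :: rs => pvZipStarAux r rs

-- the _WORDS module dict of Source B (insertion-ordered association list, first-match lookup)
def pvWordsB : List (String × (String × Bool)) :=
  [("rotate90", ("R", false)), ("rotate270", ("RRR", false)),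
   ("flip_v", ("F", false)), ("flip_h", ("F", true))]

-- one loop step of _transform: grid = zip(*grid[::-1]) for 'R', grid[::-1] otherwise
def pvStep (grid : List (List Int)) (op : Char) : List (List Int) :=
  if op == 'R' then pvZipStar grid.reverse else grid.reverse

-- _transform of Source B
def pvTransform (cells : List Int) (word : String) (mirror : Bool) : List Int :=
  let cells := if mirror then cells.reverse else cells
  let grid := [PySem.List.slice cells (some 0) (some 3), PySem.List.slice cells (some 3) (some 6),
               PySem.List.slice cells (some 6) (some 9)]
  (word.toList.foldl pvStep grid).flatMap id

def get_symmetry_alt (board : List Int) (response : Int) (transformation : String) : List Int × Int :=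
  if transformation == "rotate180" then
    (board.reverse, 8 - response)
  else
    match List.lookup transformation pvWordsB with
    | none => ([], 0)  -- raise ValueError('Method not implemented.') (excluded by Pre_)
    | some (word, mirror) =>
      let new_board := pvTransform board word mirror
      match PySem.List.index? (pvTransform (PySem.List.pyRange 0 9 1) word mirror) response with
      | some k => (new_board, (k : Int))  -- list.index(response)
      | none => ([], 0)  -- .index raises ValueError (excluded by Pre_)

-- ===== PRECONDITION & SPEC =====
-- Pre_ is exactly the set of inputs on which A returns: one of the five implemented
-- transformation names, and (except under rotate180, where no lookup happens) a response
-- that occurs in the lookup list, i.e. 0..8; everywhere else A raises ValueError.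
def Pre_get_symmetry (board : List Int) (response : Int) (transformation : String) : Prop :=
  transformation = "rotate180" ∨
    ((transformation = "rotate90" ∨ transformation = "rotate270" ∨ transformation = "flip_v" ∨
      transformation = "flip_h") ∧ 0 ≤ response ∧ response ≤ 8)
instance (board : List Int) (response : Int) (transformation : String) :
    Decidable (Pre_get_symmetry board response transformation) := by
  unfold Pre_get_symmetry; infer_instance

def pvWitness_get_symmetry : List Int × Int × String := ([1, -1, 0, 0, 1, 0, 0, 0, -1], 3, "rotate90")

def Spec_get_symmetry (board : List Int) (response : Int) (transformation : String) (out : List Int × Int) : Prop := out = get_symmetry_alt board response transformation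
instance (board : List Int) (response : Int) (transformation : String) (out : List Int × Int) : Decidable (Spec_get_symmetry board response transformation out) := by unfold Spec_get_symmetry; infer_instance

-- ===== CLAIM (what is proved, stated in full; the proofs are below) =====
def Claim_equal_get_symmetry : Prop := ∀ (board : List Int) (response : Int) (transformation : String), Dom_get_symmetry board response transformation → Pre_get_symmetry board response transformation → Spec_get_symmetry board response transformation (get_symmetry board response transformation)

-- ===== LEMMAS AND PROOFS =====

-- the grid slices of both ports, in drop/take form so they reduce on any cons-shaped list
theorem pv_sl03 (l : List Int) : PySem.List.slice l (some 0) (some 3) = l.take 3 := by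
  simp [PySem.List.slice_toNat]

theorem pv_sl03n (l : List Int) : PySem.List.slice l none (some 3) = l.take 3 := by
  simp [PySem.List.slice_to]

theorem pv_sl36 (l : List Int) : PySem.List.slice l (some 3) (some 6) = (l.drop 3).take 3 := by
  simp [PySem.List.slice_toNat]

theorem pv_sl69 (l : List Int) : PySem.List.slice l (some 6) (some 9) = (l.drop 6).take 3 := by
  simp [PySem.List.slice_toNat]

-- ===== VERDICT (by name: the statement is the Claim_ definition above) =====
theorem get_symmetry_spec : Claim_equal_get_symmetry := by
  intro board response transformation _ hpre
  unfold Spec_get_symmetry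
  rcases hpre with rfl | ⟨htr, hr0, hr8⟩
  · rfl
  · rcases htr with rfl | rfl | rfl | rfl
    -- rotate90, rotate270, flip_v: both sides reduce once the board's first nine cells are exposed
    case inl | inr.inl | inr.inr.inl =>
      interval_cases response <;>
        (simp only [get_symmetry, get_symmetry_alt, pvTransform, pvWordsB,
           pv_sl03, pv_sl36, pv_sl69]
         rcases board with _ | ⟨a0, _ | ⟨a1, _ | ⟨a2, _ | ⟨a3, _ | ⟨a4, _ | ⟨a5, _ | ⟨a6, _ | ⟨a7, _ | ⟨a8, rest⟩⟩⟩⟩⟩⟩⟩⟩⟩ <;>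
           rfl)
    -- flip_h: both sides act on board.reverse; generalize it and expose its first nine cells
    case inr.inr.inr =>
      interval_cases response <;>
        (simp only [get_symmetry, get_symmetry_alt, pvTransform, pvWordsB,
           pv_sl03, pv_sl03n, pv_sl36, pv_sl69]
         generalize board.reverse = br
         rcases br with _ | ⟨a0, _ | ⟨a1, _ | ⟨a2, _ | ⟨a3, _ | ⟨a4, _ | ⟨a5, _ | ⟨a6, _ | ⟨a7, _ | ⟨a8, rest⟩⟩⟩⟩⟩⟩⟩⟩⟩ <;>
           rfl)
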